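-- pv_equiv track=rewrite | github.com/ta3map/Synapto_Catcher | graphical_processor.py | invert_color
-- ===== SOURCE A (Python) =====
-- def invert_color(color):
--     try:
--         color = color.lstrip('#')
--         if len(color) != 6:
--             return color
--         rgb = tuple(int(color[i:i+2], 16) for i in (0, 2, 4))
--         inverted_rgb = tuple(255 - c for c in rgb)
--         return '#{:02x}{:02x}{:02x}'.format(*inverted_rgb)
--     except (ValueError, TypeError):
--         return color
-- ===== SOURCE B (Python) =====
-- _INVERT = str.maketrans('0123456789abcdefABCDEF', 'fedcba9876543210543210')
-- _HEXDIGITS = '0123456789abcdefABCDEF'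
--
--
-- def invert_color(color):
--     color = color.lstrip('#')
--     if len(color) == 6 and all(c in _HEXDIGITS for c in color):
--         return '#' + color.translate(_INVERT)
--     return color
-- ===== Notes on version B (the rewrite author's own statement) =====
-- stated objective: alternative
-- what changed: Replaces slicing into three byte fields, int(...,16) parsing and 255-c arithmetic with a precomputed per-character translation table (str.maketrans): each hex digit maps directly to its complement nibble, with an explicit all-hex-digits guard instead of try/except.
-- outside the precondition, e.g. on invert_color(' 12345'): A returns '#fedcba', B returns ' 12345'; on invert_color('-12345'): A returns '#100dcba', B returns '-12345'
import Mathlib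
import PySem

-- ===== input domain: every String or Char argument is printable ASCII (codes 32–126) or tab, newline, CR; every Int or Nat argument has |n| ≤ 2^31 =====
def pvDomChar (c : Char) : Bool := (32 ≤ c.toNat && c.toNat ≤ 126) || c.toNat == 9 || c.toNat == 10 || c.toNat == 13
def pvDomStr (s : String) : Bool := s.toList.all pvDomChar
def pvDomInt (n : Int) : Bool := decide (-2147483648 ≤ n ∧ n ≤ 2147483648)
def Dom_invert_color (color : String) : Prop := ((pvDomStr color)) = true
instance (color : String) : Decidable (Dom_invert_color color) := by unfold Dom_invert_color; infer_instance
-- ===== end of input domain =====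

-- B replaces slice-parse-subtract with a per-character complement-nibble translation table (objective: alternative).

-- ===== PORT A =====
-- '{:02x}'-style helpers: pvDigA k = lowercase hex digit, pvToHexA n = lowercase hex digits of n
-- (msd first), pvHex2A n = '{:02x}'.format(n) — exact for 0 ≤ n (A only formats values in [0, 510]).
def pvDigA (k : Nat) : Char := "0123456789abcdef".toList.getD k '0'

def pvToHexAux : Nat → Nat → List Char
  | 0, n => [pvDigA (n % 16)]
  | fuel+1, n => if n < 16 then [pvDigA n] else pvToHexAux fuel (n / 16) ++ [pvDigA (n % 16)]

def pvToHexA (n : Nat) : List Char := pvToHexAux n n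

def pvHex2A (n : Int) : List Char :=
  let ds := pvToHexA n.toNat
  List.replicate (2 - ds.length) '0' ++ ds

def invert_color (color : String) : String :=
  -- color = color.lstrip('#'): drop leading '#' characters (exact hand port of lstrip with a chars argument)
  let cs := color.toList.dropWhile (· == '#')
  if cs.length ≠ 6 then String.ofList cs
  else
    -- tuple(int(color[i:i+2], 16) for i in (0, 2, 4)): evaluated lazily, ValueError caught → return color
    match PySem.Int.ofCharsBase? (PySem.List.slice cs (some 0) (some 2)) 16 with
    | none => String.ofList cs
    | some r =>
      match PySem.Int.ofCharsBase? (PySem.List.slice cs (some 2) (some 4)) 16 with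
      | none => String.ofList cs
      | some g =>
        match PySem.Int.ofCharsBase? (PySem.List.slice cs (some 4) (some 6)) 16 with
        | none => String.ofList cs
        | some b =>
          String.ofList ('#' :: (pvHex2A (255 - r) ++ pvHex2A (255 - g) ++ pvHex2A (255 - b)))

-- ===== PORT B =====
-- str.maketrans('0123456789abcdefABCDEF', 'fedcba9876543210543210') as an association list;
-- pvTranslateB c = c.translate(_INVERT) on one character (unmapped characters stay unchanged).
def pvInvTableB : List (Char × Char) :=
  [('0','f'),('1','e'),('2','d'),('3','c'),('4','b'),('5','a'),('6','9'),('7','8'),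
   ('8','7'),('9','6'),('a','5'),('b','4'),('c','3'),('d','2'),('e','1'),('f','0'),
   ('A','5'),('B','4'),('C','3'),('D','2'),('E','1'),('F','0')]

def pvTranslateB (c : Char) : Char :=
  match pvInvTableB.lookup c with
  | some d => d
  | none => c

def invert_color_alt (color : String) : String :=
  let cs := color.toList.dropWhile (· == '#')
  if cs.length == 6 && cs.all (fun c => ("0123456789abcdefABCDEF".toList).contains c) then
    String.ofList ('#' :: cs.map pvTranslateB)
  else String.ofList cs

-- ===== PRECONDITION & SPEC =====
-- Pre_ excludes strings whose '#'-stripped form has length 6 but is not six plain hex digits and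
-- contains whitespace or a sign character: there Python's lenient int(.,16) can still parse a
-- 2-char field (' 1', '+a', '-f'), and A's resulting value (possibly with a seven-hex-digit body,
-- from a negative field) is an accident of int()'s leniency rather than intended colour inversion.
def Pre_invert_color (color : String) : Prop :=
  let cs := color.toList.dropWhile (· == '#')
  cs.length = 6 →
    (cs.all (fun c => ("0123456789abcdefABCDEF".toList).contains c) = true ∨
     cs.all (fun c => !([' ', '\t', '\n', '\r', '+', '-'] : List Char).contains c) = true)
instance (color : String) : Decidable (Pre_invert_color color) := by
  unfold Pre_invert_color; infer_instance

def pvWitness_invert_color : String := "#1a2B3c"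

def Spec_invert_color (color : String) (out : String) : Prop := out = invert_color_alt color
instance (color : String) (out : String) : Decidable (Spec_invert_color color out) := by
  unfold Spec_invert_color; infer_instance

-- ===== CLAIM (what is proved, stated in full; the proofs are below) =====
def Claim_equal_invert_color : Prop := ∀ (color : String), Dom_invert_color color → Pre_invert_color color → Spec_invert_color color (invert_color color)

-- ===== LEMMAS AND PROOFS =====
def pvHEX : List Char := "0123456789abcdefABCDEF".toList
def pvLEN : List Char := [' ', '\t', '\n', '\r', '+', '-']
def pvDOM : List Char := ((List.range 95).map (fun k => Char.ofNat (32 + k))) ++ ['\t', '\n', '\r']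
def pvHv (c : Char) : Nat :=
  let i := pvHEX.findIdx (· == c)
  if i < 16 then i else i - 6

set_option maxRecDepth 10000 in
theorem pvPairFailB : (pvDOM.all fun x => pvDOM.all fun y =>
    pvLEN.contains x || pvLEN.contains y || (pvHEX.contains x && pvHEX.contains y) ||
    (PySem.Int.ofCharsBase? [x, y] 16 == none)) = true := by decide

set_option maxRecDepth 10000 in
theorem pvPairHexB : (pvHEX.all fun x => pvHEX.all fun y =>
    PySem.Int.ofCharsBase? [x, y] 16 == some ((16 * pvHv x + pvHv y : Nat) : Int)) = true := by decide

theorem pvFmtB : ((List.range 16).all fun a => (List.range 16).all fun b =>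
    pvHex2A ((255 : Int) - ((16 * a + b : Nat) : Int)) == [pvDigA (15 - a), pvDigA (15 - b)]) = true := by
  decide

theorem pvTransB : (pvHEX.all fun x => pvTranslateB x == pvDigA (15 - pvHv x)) = true := by decide

theorem pvHvLtB : (pvHEX.all fun x => pvHv x < 16) = true := by decide

theorem pvMemDOM (c : Char) (h : pvDomChar c = true) : c ∈ pvDOM := by
  have hc : (32 ≤ c.toNat ∧ c.toNat ≤ 126) ∨ c.toNat = 9 ∨ c.toNat = 10 ∨ c.toNat = 13 := by
    simp only [pvDomChar, Bool.or_eq_true, Bool.and_eq_true, decide_eq_true_eq, beq_iff_eq] at h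
    tauto
  have hofnat : Char.ofNat c.toNat = c := Char.ofNat_toNat c
  rcases hc with ⟨h1, h2⟩ | h9 | h10 | h13
  · apply List.mem_append_left
    refine List.mem_map.mpr ⟨c.toNat - 32, List.mem_range.mpr (by omega), ?_⟩
    rw [show 32 + (c.toNat - 32) = c.toNat by omega, hofnat]
  · apply List.mem_append_right
    have : c = '\t' := by rw [← hofnat, h9]
    simp [this]
  · apply List.mem_append_right
    have : c = '\n' := by rw [← hofnat, h10]
    simp [this]
  · apply List.mem_append_right
    have : c = '\r' := by rw [← hofnat, h13]
    simp [this]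

set_option maxRecDepth 10000 in
theorem pvPairFail (x y : Char) (hx : pvDomChar x = true) (hy : pvDomChar y = true)
    (hlx : x ∉ pvLEN) (hly : y ∉ pvLEN) (hbad : ¬(x ∈ pvHEX ∧ y ∈ pvHEX)) :
    PySem.Int.ofCharsBase? [x, y] 16 = none := by
  have := pvPairFailB
  simp only [List.all_eq_true] at this
  have h := this x (pvMemDOM x hx) y (pvMemDOM y hy)
  have hx' : pvLEN.contains x = false := by
    simpa [List.contains_eq_mem] using hlx
  have hy' : pvLEN.contains y = false := by
    simpa [List.contains_eq_mem] using hly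
  have hb' : (pvHEX.contains x && pvHEX.contains y) = false := by
    cases h1 : pvHEX.contains x <;> cases h2 : pvHEX.contains y <;> simp
    exact absurd ⟨by simpa [List.contains_eq_mem] using h1,
      by simpa [List.contains_eq_mem] using h2⟩ hbad
  rw [hx', hy', hb'] at h
  simpa using h

theorem pvPairHex (x y : Char) (hx : x ∈ pvHEX) (hy : y ∈ pvHEX) :
    PySem.Int.ofCharsBase? [x, y] 16 = some ((16 * pvHv x + pvHv y : Nat) : Int) := by
  have := pvPairHexB
  simp only [List.all_eq_true] at this
  have h := this x hx y hy
  simpa using h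

theorem pvFmt (a b : Nat) (ha : a < 16) (hb : b < 16) :
    pvHex2A ((255 : Int) - ((16 * a + b : Nat) : Int)) = [pvDigA (15 - a), pvDigA (15 - b)] := by
  have := pvFmtB
  simp only [List.all_eq_true] at this
  have h := this a (List.mem_range.mpr ha) b (List.mem_range.mpr hb)
  simpa using h

theorem pvTrans (x : Char) (hx : x ∈ pvHEX) : pvTranslateB x = pvDigA (15 - pvHv x) := by
  have := pvTransB
  simp only [List.all_eq_true] at this
  simpa using this x hx

theorem pvHvLt (x : Char) (hx : x ∈ pvHEX) : pvHv x < 16 := by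
  have := pvHvLtB
  simp only [List.all_eq_true] at this
  simpa using this x hx

-- ===== VERDICT (by name: the statement is the Claim_ definition above) =====
theorem invert_color_spec : Claim_equal_invert_color := by
  intro color hdom hpre
  unfold Spec_invert_color invert_color invert_color_alt
  have hdom' : ∀ c ∈ color.toList.dropWhile (· == '#'), pvDomChar c = true := by
    intro c hc
    have hsub : (color.toList.dropWhile (· == '#')).Sublist color.toList :=
      List.dropWhile_sublist _
    have : c ∈ color.toList := hsub.mem hc
    exact List.all_eq_true.mp hdom c this
  unfold Pre_invert_color at hpre
  set cs := color.toList.dropWhile (· == '#') with hcs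
  by_cases h6 : cs.length = 6
  · simp only [h6, ne_eq, not_true_eq_false, if_false]
    rcases hxcs : cs with _ | ⟨c0, _ | ⟨c1, _ | ⟨c2, _ | ⟨c3, _ | ⟨c4, _ | ⟨c5, rest⟩⟩⟩⟩⟩⟩ <;>
      rw [hxcs] at h6 <;> simp only [List.length] at h6 <;> try omega
    have hrest : rest = [] := by
      have := h6; cases rest with
      | nil => rfl
      | cons _ _ => simp at this
    subst hrest
    rw [hxcs] at hdom' hpre
    have hpre0 := hpre (by simp)
    have hpre' : (∀ c ∈ ([c0,c1,c2,c3,c4,c5] : List Char), c ∈ pvHEX) ∨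
        (∀ c ∈ ([c0,c1,c2,c3,c4,c5] : List Char), c ∉ pvLEN) := by
      rcases hpre0 with h | h
      · left; intro c hc
        have := List.all_eq_true.mp h c hc
        simpa [pvHEX, List.contains_eq_mem] using this
      · right; intro c hc
        have := List.all_eq_true.mp h c hc
        simpa [pvLEN, List.contains_eq_mem] using this
    -- slices reduce on the explicit 6-element list
    have hs1 : PySem.List.slice [c0,c1,c2,c3,c4,c5] (some 0) (some 2) = [c0,c1] := rfl
    have hs2 : PySem.List.slice [c0,c1,c2,c3,c4,c5] (some 2) (some 4) = [c2,c3] := rfl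
    have hs3 : PySem.List.slice [c0,c1,c2,c3,c4,c5] (some 4) (some 6) = [c4,c5] := rfl
    rw [hs1, hs2, hs3]
    by_cases hhex : ∀ c ∈ ([c0,c1,c2,c3,c4,c5] : List Char), c ∈ pvHEX
    · have h0 := hhex c0 (by simp); have h1 := hhex c1 (by simp)
      have h2 := hhex c2 (by simp); have h3 := hhex c3 (by simp)
      have h4 := hhex c4 (by simp); have h5 := hhex c5 (by simp)
      rw [pvPairHex c0 c1 h0 h1, pvPairHex c2 c3 h2 h3, pvPairHex c4 c5 h4 h5]
      have hguard : ([c0,c1,c2,c3,c4,c5] : List Char).all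
          (fun c => ("0123456789abcdefABCDEF".toList).contains c) = true := by
        simp only [List.all_eq_true, List.contains_eq_mem, decide_eq_true_eq]
        intro c hc; exact hhex c hc
      simp only [beq_self_eq_true, Bool.true_and, hguard, if_true]
      rw [pvFmt _ _ (pvHvLt c0 h0) (pvHvLt c1 h1), pvFmt _ _ (pvHvLt c2 h2) (pvHvLt c3 h3),
          pvFmt _ _ (pvHvLt c4 h4) (pvHvLt c5 h5)]
      simp only [List.map_cons, List.map_nil]
      rw [pvTrans c0 h0, pvTrans c1 h1, pvTrans c2 h2, pvTrans c3 h3, pvTrans c4 h4,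
          pvTrans c5 h5]
      rfl
    · -- some character is not a hex digit; by Pre_, no character is lenient, so a field fails to parse
      have hlen : ∀ c ∈ ([c0,c1,c2,c3,c4,c5] : List Char), c ∉ pvLEN := by
        rcases hpre' with hall | hnol
        · exact absurd hall hhex
        · exact hnol
      have hguard : (([c0,c1,c2,c3,c4,c5] : List Char).all
          (fun c => ("0123456789abcdefABCDEF".toList).contains c)) = false := by
        rw [Bool.eq_false_iff]
        intro hall
        apply hhex
        intro c hc
        have := List.all_eq_true.mp hall c hc
        simpa [pvHEX, List.contains_eq_mem] using this
      push Not at hhex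
      obtain ⟨c, hc, hcbad⟩ := hhex
      simp only [List.mem_cons, List.not_mem_nil, or_false] at hc
      have hfail : PySem.Int.ofCharsBase? [c0,c1] 16 = none ∨
          PySem.Int.ofCharsBase? [c2,c3] 16 = none ∨
          PySem.Int.ofCharsBase? [c4,c5] 16 = none := by
        rcases hc with rfl | rfl | rfl | rfl | rfl | rfl
        · exact Or.inl (pvPairFail _ _ (hdom' _ (by simp)) (hdom' _ (by simp))
            (hlen _ (by simp)) (hlen _ (by simp)) (by tauto))
        · exact Or.inl (pvPairFail _ _ (hdom' _ (by simp)) (hdom' _ (by simp))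
            (hlen _ (by simp)) (hlen _ (by simp)) (by tauto))
        · exact Or.inr (Or.inl (pvPairFail _ _ (hdom' _ (by simp)) (hdom' _ (by simp))
            (hlen _ (by simp)) (hlen _ (by simp)) (by tauto)))
        · exact Or.inr (Or.inl (pvPairFail _ _ (hdom' _ (by simp)) (hdom' _ (by simp))
            (hlen _ (by simp)) (hlen _ (by simp)) (by tauto)))
        · exact Or.inr (Or.inr (pvPairFail _ _ (hdom' _ (by simp)) (hdom' _ (by simp))
            (hlen _ (by simp)) (hlen _ (by simp)) (by tauto)))
        · exact Or.inr (Or.inr (pvPairFail _ _ (hdom' _ (by simp)) (hdom' _ (by simp))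
            (hlen _ (by simp)) (hlen _ (by simp)) (by tauto)))
      simp only [hguard, Bool.and_false]
      rcases hfail with hf | hf | hf
      · rw [hf]; rfl
      · rw [hf]; cases PySem.Int.ofCharsBase? [c0,c1] 16 <;> rfl
      · rw [hf]
        cases PySem.Int.ofCharsBase? [c0,c1] 16 <;> cases PySem.Int.ofCharsBase? [c2,c3] 16 <;> rfl
  · simp only [h6, if_true, ne_eq, not_false_eq_true]
    have : (cs.length == 6) = false := by simpa using h6
    simp [this]
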